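-- pv_equiv track=rewrite | github.com/gunba/overwatch-liquipedia-analyzer | 6_process_legacy_data.py | parse_wikitext_element
-- ===== SOURCE A (Python) =====
-- def parse_wikitext_element(element):
--     lines = element.split("\n")
--     element_dict = {}
--     current_key = None
--     current_value = None
--
--     for line in lines:
--         if line.strip().startswith("|"):
--             if current_key is not None:
--                 # Save the previous key-value pair
--                 element_dict[current_key.strip().lstrip("|")] = (
--                     current_value.strip()
--                 )
--             # Split the new line by the first '=' to get the key and value
--             key_value = line[1:].split("=", 1)
--             if len(key_value) == 2:
--                 current_key, current_value = key_value
--             else: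
--                 current_key = key_value[0]
--                 current_value = ""
--         else:
--             if current_key is not None:
--                 # Continue the value on the next line
--                 current_value += "\n" + line
--
--     # Add the last key-value pair
--     if current_key is not None:
--         element_dict[current_key.strip().lstrip("|")] = current_value.strip()
--
--     return element_dict
-- ===== SOURCE B (Python) =====
-- def parse_wikitext_element(element):
--     lines = element.split("\n")
--
--     # Pass 1: group the lines into segments: a header line (stripped line
--     # starts with '|') plus its following continuation lines.  Lines before
--     # the first header are discarded.
--     segments = []
--     i, n = 0, len(lines)
--     while i < n and not lines[i].strip().startswith("|"):
--         i += 1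
--     while i < n:
--         header = lines[i]
--         i += 1
--         conts = []
--         while i < n and not lines[i].strip().startswith("|"):
--             conts.append(lines[i])
--             i += 1
--         segments.append((header, conts))
--
--     # Pass 2: map each segment to a key/value pair.
--     element_dict = {}
--     for header, conts in segments:
--         kv = header[1:].split("=", 1)
--         initial = kv[1] if len(kv) == 2 else ""
--         element_dict[kv[0].strip().lstrip("|")] = "\n".join([initial] + conts).strip()
--     return element_dict
-- ===== Notes on version B (the rewrite author's own statement) =====
-- stated objective: alternative
-- what changed: A's single interleaved state machine (dict + current key/value threaded through one loop) is replaced by two passes: first group the lines into (header, continuation-lines) segments, then map each segment to a key/value pair whose value is the newline-join of its pieces.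
import Mathlib
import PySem

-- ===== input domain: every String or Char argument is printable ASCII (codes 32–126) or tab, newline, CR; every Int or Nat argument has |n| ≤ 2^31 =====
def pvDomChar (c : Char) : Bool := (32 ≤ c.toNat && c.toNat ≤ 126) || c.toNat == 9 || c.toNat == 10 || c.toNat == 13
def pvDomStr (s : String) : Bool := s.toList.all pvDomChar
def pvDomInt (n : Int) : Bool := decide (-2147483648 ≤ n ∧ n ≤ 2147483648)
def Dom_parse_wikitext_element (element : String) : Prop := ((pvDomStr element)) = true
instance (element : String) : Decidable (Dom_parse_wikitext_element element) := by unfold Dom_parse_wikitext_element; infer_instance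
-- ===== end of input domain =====

-- B replaces A's interleaved one-loop state machine by two passes (segment grouping, then
-- per-segment mapping); same cost, alternative decomposition.

-- ===== PORT A =====
-- shared with port B (both Pythons perform these identical elementary steps):
-- line.strip().startswith("|")
def pvIsHeader (line : String) : Bool := PySem.Str.startswith (PySem.Str.strip line) "|"
-- s.lstrip("|"): drop leading '|' characters (exact: lstrip with an explicit char set)
def pvLstripPipes (s : String) : String := String.ofList (s.toList.dropWhile (fun c => c == '|'))
-- key.strip().lstrip("|")
def pvCleanKey (k : String) : String := pvLstripPipes (PySem.Str.strip k)
-- kv = line[1:].split("=", 1); (kv[0], kv[1] if len(kv)==2 else "")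
-- (Chars.splitOnMax is split(sep, maxsplit) for nonempty sep; it returns 1 or 2 parts here,
-- so the last match arm is unreachable)
def pvSplitKV (line : String) : String × String :=
  match PySem.Chars.splitOnMax (line.toList.drop 1) ['='] 1 with
  | [k, v] => (String.ofList k, String.ofList v)
  | [k] => (String.ofList k, "")
  | _ => ("", "")

-- the loop body of A
def pvStepA (st : PySem.Dict String String × Option (String × String)) (line : String) :
    PySem.Dict String String × Option (String × String) :=
  if pvIsHeader line then
    let d := match st.2 with
      | some (k, v) => st.1.insert (pvCleanKey k) (PySem.Str.strip v)
      | none => st.1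
    (d, some (pvSplitKV line))
  else
    match st.2 with
    | some (k, v) => (st.1, some (k, v ++ "\n" ++ line))
    | none => st

-- the trailing "add the last key-value pair" block of A
def pvFinishA (st : PySem.Dict String String × Option (String × String)) :
    PySem.Dict String String :=
  match st.2 with
  | some (k, v) => st.1.insert (pvCleanKey k) (PySem.Str.strip v)
  | none => st.1

def parse_wikitext_element (element : String) : List (String × String) :=
  -- element.split("\n"): sep is nonempty, split? is always some
  let lines := (PySem.Str.split? element "\n").getD []
  (pvFinishA (lines.foldl pvStepA (PySem.Dict.empty, none))).items

-- ===== PORT B =====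
-- inner while loop of pass 1: collect continuation lines of header h, then continue
def pvSegsIn (h : String) (acc : List String) : List String → List (String × List String)
  | [] => [(h, acc)]
  | l :: ls => if pvIsHeader l then (h, acc) :: pvSegsIn l [] ls else pvSegsIn h (acc ++ [l]) ls

-- pass 1: skip lines before the first header, then group into segments
def pvSegs : List String → List (String × List String)
  | [] => []
  | l :: ls => if pvIsHeader l then pvSegsIn l [] ls else pvSegs ls

-- pass 2 body: one segment -> one dict entry
def pvInsertSeg (d : PySem.Dict String String) (seg : String × List String) :
    PySem.Dict String String :=
  let kv := pvSplitKV seg.1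
  d.insert (pvCleanKey kv.1) (PySem.Str.strip (PySem.Str.join "\n" (kv.2 :: seg.2)))

def parse_wikitext_element_alt (element : String) : List (String × String) :=
  let lines := (PySem.Str.split? element "\n").getD []
  ((pvSegs lines).foldl pvInsertSeg PySem.Dict.empty).items

-- ===== PRECONDITION & SPEC =====
def Spec_parse_wikitext_element (element : String) (out : List (String × String)) : Prop := out = parse_wikitext_element_alt element
instance (element : String) (out : List (String × String)) : Decidable (Spec_parse_wikitext_element element out) := by unfold Spec_parse_wikitext_element; infer_instance

-- ===== CLAIM (what is proved, stated in full; the proofs are below) =====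
def Claim_equal_parse_wikitext_element : Prop := ∀ (element : String), Dom_parse_wikitext_element element → Spec_parse_wikitext_element element (parse_wikitext_element element)

-- ===== LEMMAS AND PROOFS =====

-- '\n'.join of one more piece = appending "\n" ++ piece (Chars level)
lemma pv_chars_join_snoc (sep p q : List Char) (ps : List (List Char)) :
    PySem.Chars.join sep (p :: (ps ++ [q])) = PySem.Chars.join sep (p :: ps) ++ sep ++ q := by
  induction ps generalizing p with
  | nil => simp [PySem.Chars.join_cons_cons, PySem.Chars.join_singleton]
  | cons r rs ih =>
      simp only [List.cons_append, PySem.Chars.join_cons_cons, ih r]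
      simp [List.append_assoc]

-- the String versions of the two join facts the induction needs
lemma pv_join_snoc (v l : String) (acc : List String) :
    PySem.Str.join "\n" (v :: (acc ++ [l])) = PySem.Str.join "\n" (v :: acc) ++ "\n" ++ l := by
  apply String.toList_inj.mp
  simp only [String.toList_append, PySem.Str.toList_join, List.map_cons, List.map_append,
    List.map_cons, List.map_nil]
  exact pv_chars_join_snoc _ _ _ _

lemma pv_join_single (v : String) : PySem.Str.join "\n" [v] = v := by
  apply String.toList_inj.mp
  simp [PySem.Str.toList_join, PySem.Chars.join_singleton]

-- invariant of A's loop while a key is open: A's pending value is the '\n'-join of the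
-- header's initial value and the continuation lines collected so far
lemma pv_inner (ls : List String) (d : PySem.Dict String String) (h : String)
    (acc : List String) :
    pvFinishA (ls.foldl pvStepA (d, some ((pvSplitKV h).1,
        PySem.Str.join "\n" ((pvSplitKV h).2 :: acc)))) =
      (pvSegsIn h acc ls).foldl pvInsertSeg d := by
  induction ls generalizing d h acc with
  | nil => simp [pvFinishA, pvSegsIn, pvInsertSeg]
  | cons l ls ih =>
      by_cases hl : pvIsHeader l = true
      · simp only [List.foldl_cons, pvStepA, hl, if_pos, pvSegsIn]
        have := ih (d.insert (pvCleanKey (pvSplitKV h).1)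
            (PySem.Str.strip (PySem.Str.join "\n" ((pvSplitKV h).2 :: acc)))) l []
        rw [pv_join_single] at this
        simpa [pvInsertSeg] using this
      · simp only [List.foldl_cons, pvStepA, hl, if_neg, pvSegsIn]
        rw [← pv_join_snoc]
        exact ih d h (acc ++ [l])

-- before the first header, A carries no key and B discards the line
lemma pv_outer (ls : List String) (d : PySem.Dict String String) :
    pvFinishA (ls.foldl pvStepA (d, none)) = (pvSegs ls).foldl pvInsertSeg d := by
  induction ls generalizing d with
  | nil => simp [pvFinishA, pvSegs]
  | cons l ls ih =>
      by_cases hl : pvIsHeader l = true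
      · simp only [List.foldl_cons, pvStepA, hl, if_pos, pvSegs]
        have := pv_inner ls d l []
        rw [pv_join_single] at this
        exact this
      · simpa only [List.foldl_cons, pvStepA, hl, pvSegs] using ih d

-- ===== VERDICT (by name: the statement is the Claim_ definition above) =====
theorem parse_wikitext_element_spec : Claim_equal_parse_wikitext_element := by
  intro element _
  show parse_wikitext_element element = parse_wikitext_element_alt element
  show (pvFinishA (List.foldl pvStepA (PySem.Dict.empty, none)
      ((PySem.Str.split? element "\n").getD []))).items =
    (List.foldl pvInsertSeg PySem.Dict.empty
      (pvSegs ((PySem.Str.split? element "\n").getD []))).items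
  rw [pv_outer]
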